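-- pv_equiv track=rewrite | github.com/z-van-baars/proxima | utilities.py | get_adjacent_tiles
-- ===== SOURCE A (Python) =====
-- def get_adjacent_tiles(width, height, x, y):
--     potential_neighbors = [(x - 1, y - 1),
--                            (x, y - 1),
--                            (x + 1, y - 1),
--                            (x - 1, y),
--                            (x, y),
--                            (x + 1, y),
--                            (x - 1, y + 1),
--                            (x, y + 1),
--                            (x + 1, y + 1)]
--     valid_neighbors = set()
--     for each in potential_neighbors:
--         if not each[0] < 0 and not each[1] < 0:
--             if not each[0] > width - 1 and not each[1] > height - 1:
--                 valid_neighbors.add(each)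
--     return valid_neighbors
-- ===== SOURCE B (Python) =====
-- def get_adjacent_tiles(width, height, x, y):
--     x0, x1 = max(0, x - 1), min(width - 1, x + 1)
--     y0, y1 = max(0, y - 1), min(height - 1, y + 1)
--     return {(xi, yi) for yi in range(y0, y1 + 1) for xi in range(x0, x1 + 1)}
-- ===== Notes on version B (the rewrite author's own statement) =====
-- stated objective: alternative
-- what changed: B never enumerates or filters candidate tiles: it intersects the 3x3 neighbourhood with the grid arithmetically as two clamped closed intervals (max(0,x-1)..min(width-1,x+1) and likewise for y) and iterates the resulting integer ranges directly.
import Mathlib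
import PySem

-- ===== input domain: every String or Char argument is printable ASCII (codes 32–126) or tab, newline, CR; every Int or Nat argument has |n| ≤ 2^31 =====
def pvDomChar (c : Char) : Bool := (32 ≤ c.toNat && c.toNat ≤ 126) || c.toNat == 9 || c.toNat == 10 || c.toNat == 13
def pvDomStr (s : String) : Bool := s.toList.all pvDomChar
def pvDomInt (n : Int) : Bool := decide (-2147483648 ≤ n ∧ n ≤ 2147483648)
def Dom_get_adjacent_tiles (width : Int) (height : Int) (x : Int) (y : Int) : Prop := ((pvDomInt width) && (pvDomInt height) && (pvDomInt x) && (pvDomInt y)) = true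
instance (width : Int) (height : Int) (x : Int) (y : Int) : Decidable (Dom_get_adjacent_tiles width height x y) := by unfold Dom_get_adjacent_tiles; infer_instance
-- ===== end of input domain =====

-- B computes the intersection of the 3x3 neighbourhood with the grid as two clamped
-- closed intervals (max/min per axis) and iterates the resulting integer ranges —
-- no candidate enumeration and no bounds filtering (objective: alternative).

-- ===== PORT A =====
def get_adjacent_tiles (width : Int) (height : Int) (x : Int) (y : Int) : List (Int × Int) :=
  let potential_neighbors : List (Int × Int) :=
    [(x - 1, y - 1), (x, y - 1), (x + 1, y - 1),
     (x - 1, y), (x, y), (x + 1, y),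
     (x - 1, y + 1), (x, y + 1), (x + 1, y + 1)]
  potential_neighbors.foldl
    (fun valid_neighbors each =>
      if ¬ each.1 < 0 ∧ ¬ each.2 < 0 then
        if ¬ each.1 > width - 1 ∧ ¬ each.2 > height - 1 then
          PySem.Set.add valid_neighbors each
        else valid_neighbors
      else valid_neighbors)
    PySem.Set.empty

-- ===== PORT B =====
def get_adjacent_tiles_alt (width : Int) (height : Int) (x : Int) (y : Int) : List (Int × Int) :=
  let x0 := max 0 (x - 1)
  let x1 := min (width - 1) (x + 1)
  let y0 := max 0 (y - 1)
  let y1 := min (height - 1) (y + 1)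
  PySem.Set.ofList ((PySem.List.pyRange y0 (y1 + 1) 1).flatMap fun yi =>
    (PySem.List.pyRange x0 (x1 + 1) 1).map fun xi => (xi, yi))

-- ===== PRECONDITION & SPEC =====
def Spec_get_adjacent_tiles (width : Int) (height : Int) (x : Int) (y : Int) (out : List (Int × Int)) : Prop := out = get_adjacent_tiles_alt width height x y
instance (width : Int) (height : Int) (x : Int) (y : Int) (out : List (Int × Int)) : Decidable (Spec_get_adjacent_tiles width height x y out) := by unfold Spec_get_adjacent_tiles; infer_instance

-- ===== CLAIM (what is proved, stated in full; the proofs are below) =====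
def Claim_equal_get_adjacent_tiles : Prop := ∀ (width : Int) (height : Int) (x : Int) (y : Int), Dom_get_adjacent_tiles width height x y → Spec_get_adjacent_tiles width height x y (get_adjacent_tiles width height x y)

-- ===== LEMMAS AND PROOFS =====

-- A's conditional-add fold is the unconditional fold over the filtered candidates.
theorem foldA_eq_filter (width height : Int) (l : List (Int × Int)) (acc : List (Int × Int)) :
    l.foldl
      (fun valid_neighbors each =>
        if ¬ each.1 < 0 ∧ ¬ each.2 < 0 then
          if ¬ each.1 > width - 1 ∧ ¬ each.2 > height - 1 then
            PySem.Set.add valid_neighbors each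
          else valid_neighbors
        else valid_neighbors) acc
    = (l.filter fun e => decide (0 ≤ e.1 ∧ e.1 ≤ width - 1) && decide (0 ≤ e.2 ∧ e.2 ≤ height - 1)).foldl PySem.Set.add acc := by
  induction l generalizing acc with
  | nil => rfl
  | cons a t ih =>
    simp only [List.foldl_cons, List.filter_cons, Bool.and_eq_true, decide_eq_true_eq]
    split_ifs <;> first
      | exact ih _
      | (exfalso; omega)

theorem nine_nodup (x y : Int) :
    ([(x - 1, y - 1), (x, y - 1), (x + 1, y - 1),
      (x - 1, y), (x, y), (x + 1, y),
      (x - 1, y + 1), (x, y + 1), (x + 1, y + 1)] : List (Int × Int)).Nodup := by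
  simp only [List.nodup_cons, List.mem_cons, List.not_mem_nil, Prod.mk.injEq, List.nodup_nil,
    not_or, and_true, not_false_eq_true, not_and]
  and_intros <;> omega

-- Two strictly increasing integer lists with the same members are equal.
theorem eq_of_pairwise_lt_of_mem_iff {l1 : List Int} : ∀ {l2 : List Int},
    l1.Pairwise (· < ·) → l2.Pairwise (· < ·) → (∀ t, t ∈ l1 ↔ t ∈ l2) → l1 = l2 := by
  induction l1 with
  | nil =>
    intro l2 _ _ h
    cases l2 with
    | nil => rfl
    | cons b t2 => exact absurd ((h b).2 (List.mem_cons_self ..)) (by simp)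
  | cons a t ih =>
    intro l2 h1 h2 h
    cases l2 with
    | nil => exact absurd ((h a).1 (List.mem_cons_self ..)) (by simp)
    | cons b t2 =>
      have hab : a = b := by
        rcases List.mem_cons.1 ((h a).1 (List.mem_cons_self ..)) with rfl | ha2
        · rfl
        · rcases List.mem_cons.1 ((h b).2 (List.mem_cons_self ..)) with rfl | hb2
          · rfl
          · have := List.rel_of_pairwise_cons h2 ha2
            have := List.rel_of_pairwise_cons h1 hb2
            omega
      subst hab
      have htail : ∀ t', t' ∈ t ↔ t' ∈ t2 := by
        intro t'
        constructor
        · intro ht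
          have halt := List.rel_of_pairwise_cons h1 ht
          rcases List.mem_cons.1 ((h t').1 (List.mem_cons_of_mem _ ht)) with rfl | h2' 
          · omega
          · exact h2'
        · intro ht
          have halt := List.rel_of_pairwise_cons h2 ht
          rcases List.mem_cons.1 ((h t').2 (List.mem_cons_of_mem _ ht)) with rfl | h1'
          · omega
          · exact h1'
      exact congrArg (List.cons a) (ih (List.pairwise_cons.1 h1).2 (List.pairwise_cons.1 h2).2 htail)

theorem triple_pairwise (a : Int) : ([a - 1, a, a + 1] : List Int).Pairwise (· < ·) := by
  simp only [List.pairwise_cons, List.mem_cons, List.not_mem_nil, or_false]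
  refine ⟨?_, ?_, ?_, List.Pairwise.nil⟩
  · rintro b (rfl | rfl) <;> omega
  · rintro b rfl; omega
  · exact fun b hb => hb.elim

-- The clamped per-axis range is exactly the in-bounds part of {a-1, a, a+1}.
theorem range_eq_filter (w a : Int) :
    PySem.List.pyRange (max 0 (a - 1)) (min (w - 1) (a + 1) + 1) 1
      = [a - 1, a, a + 1].filter (fun t => decide (0 ≤ t ∧ t ≤ w - 1)) := by
  apply eq_of_pairwise_lt_of_mem_iff
  · exact PySem.List.pairwise_lt_pyRange_one ..
  · exact (triple_pairwise a).filter _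
  · intro t
    rw [PySem.List.mem_pyRange_one]
    simp only [List.mem_filter, List.mem_cons, List.not_mem_nil, or_false, decide_eq_true_eq]
    constructor
    · intro ⟨h1, h2⟩; exact ⟨by omega, by omega⟩
    · rintro ⟨(rfl | rfl | rfl), h1, h2⟩ <;> omega

theorem prod_nodup (ys xs : List Int) (hy : ys.Nodup) (hx : xs.Nodup) :
    (ys.flatMap fun yi => xs.map fun xi => (xi, yi)).Nodup := by
  refine List.nodup_flatMap.2 ⟨fun yi _ => hx.map ?_, ?_⟩
  · intro a b hab; exact congrArg Prod.fst hab
  · refine hy.imp ?_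
    intro a b hab p hpa hpb
    simp only [List.mem_map] at hpa hpb
    obtain ⟨xa, _, rfl⟩ := hpa
    obtain ⟨xb, _, he⟩ := hpb
    exact hab (congrArg Prod.snd he).symm

theorem filter_prod (px py : Int → Bool) (ys xs : List Int) :
    ((ys.flatMap fun yi => xs.map fun xi => (xi, yi)).filter fun e => px e.1 && py e.2)
    = (ys.filter py).flatMap fun yi => (xs.filter px).map fun xi => (xi, yi) := by
  induction ys with
  | nil => rfl
  | cons b t ih =>
    simp only [List.flatMap_cons, List.filter_append, ih, List.filter_cons]
    cases hb : py b <;> simp [List.filter_map, Function.comp_def, hb]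

-- ===== VERDICT (by name: the statement is the Claim_ definition above) =====
theorem get_adjacent_tiles_spec : Claim_equal_get_adjacent_tiles := by
  intro width height x y _
  unfold Spec_get_adjacent_tiles
  show get_adjacent_tiles width height x y = get_adjacent_tiles_alt width height x y
  simp only [get_adjacent_tiles, get_adjacent_tiles_alt]
  rw [foldA_eq_filter]
  rw [show (PySem.Set.empty : List (Int × Int)) = [] from rfl]
  rw [← PySem.Set.ofList_eq_foldl]
  rw [PySem.Set.ofList_eq_self_of_nodup _ ((nine_nodup x y).filter _)]
  rw [range_eq_filter width x, range_eq_filter height y]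
  rw [PySem.Set.ofList_eq_self_of_nodup _
    (prod_nodup _ _ (((triple_pairwise y).filter _).imp fun h => by omega)
      (((triple_pairwise x).filter _).imp fun h => by omega))]
  rw [show ([(x - 1, y - 1), (x, y - 1), (x + 1, y - 1),
             (x - 1, y), (x, y), (x + 1, y),
             (x - 1, y + 1), (x, y + 1), (x + 1, y + 1)] : List (Int × Int))
      = ([y - 1, y, y + 1].flatMap fun yi => [x - 1, x, x + 1].map fun xi => (xi, yi)) from rfl]
  exact filter_prod (fun a => decide (0 ≤ a ∧ a ≤ width - 1))
    (fun b => decide (0 ≤ b ∧ b ≤ height - 1)) [y - 1, y, y + 1] [x - 1, x, x + 1]
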